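-- pv_equiv track=rewrite | github.com/bryanhann/prj.translate | wordbook/dictionary.py | eD_4_eQL
-- ===== SOURCE A (Python) =====
-- def eD_4_eQL(eQL):
--     import collections
--     def __fix(item):
--         key, val = item
--         return key, sorted(set(('|'.join(val)).split('|')))
--     acc = collections.OrderedDict()
--     for (e,dname,linenum,chis, line) in eQL:
--         # reject bad e.
--         if not e: continue
--         key = e#Q[0]
--         val = chis
--         try: acc[key]
--         except KeyError: acc[key]=[]
--         acc[key].append(chis)
--     return collections.OrderedDict(map(__fix,acc.items()))
-- ===== SOURCE B (Python) =====
-- def eD_4_eQL(eQL):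
--     import collections
--     # pass 1: first-occurrence order of the non-empty keys
--     keys = []
--     for e, dname, linenum, chis, line in eQL:
--         if e and e not in keys:
--             keys.append(e)
--     # pass 2: for each key, rescan eQL and collect its sorted distinct tokens
--     return collections.OrderedDict(
--         (k, sorted({t for (e, _, _, chis, _) in eQL if e == k for t in chis.split('|')}))
--         for k in keys)
-- ===== Notes on version B (the rewrite author's own statement) =====
-- stated objective: alternative
-- what changed: Drops A's dict-of-lists grouping plus per-key join/resplit/set/sort reduction entirely: B first computes the ordered list of distinct keys, then rescans the whole input once per key with a set comprehension, so no grouping accumulator or string join exists; it trades O(K*N) nested scans for A's single grouped pass.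
import Mathlib
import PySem

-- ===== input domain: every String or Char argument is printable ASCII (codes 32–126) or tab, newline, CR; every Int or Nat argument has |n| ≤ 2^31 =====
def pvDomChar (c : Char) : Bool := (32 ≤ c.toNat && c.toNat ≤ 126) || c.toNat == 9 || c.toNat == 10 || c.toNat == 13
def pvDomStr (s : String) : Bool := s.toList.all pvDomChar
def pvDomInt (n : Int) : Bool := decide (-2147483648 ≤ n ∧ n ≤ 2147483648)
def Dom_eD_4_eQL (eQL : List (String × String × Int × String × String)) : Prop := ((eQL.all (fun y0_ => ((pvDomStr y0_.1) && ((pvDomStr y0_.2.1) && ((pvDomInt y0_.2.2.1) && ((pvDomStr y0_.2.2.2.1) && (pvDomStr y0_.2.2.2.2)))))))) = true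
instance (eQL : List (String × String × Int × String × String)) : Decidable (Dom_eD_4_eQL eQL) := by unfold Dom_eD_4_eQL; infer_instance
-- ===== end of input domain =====

-- B drops A's dict-of-lists grouping and per-key join/resplit reduction: it lists the distinct
-- keys first, then rescans the input once per key collecting sorted distinct tokens (alternative).

-- shared helper: s.split('|')  (sep is the nonempty literal "|", so split? is always `some`)
def pvSplitBar (s : String) : List String := (PySem.Str.split? s "|").getD []

-- ===== PORT A =====
-- loop body: `if not e: continue`; `try: acc[key] except KeyError: acc[key]=[]`; `acc[key].append(chis)`
def pvStepA (acc : PySem.Dict String (List String)) (row : String × String × Int × String × String) :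
    PySem.Dict String (List String) :=
  let e := row.1
  let chis := row.2.2.2.1
  if e = "" then acc
  else
    let acc := if acc.contains e then acc else acc.insert e []
    acc.insert e (acc.getD e [] ++ [chis])

def eD_4_eQL (eQL : List (String × String × Int × String × String)) : List (String × List String) :=
  let acc := eQL.foldl pvStepA PySem.Dict.empty
  -- OrderedDict(map(__fix, acc.items())): key, sorted(set(('|'.join(val)).split('|')))
  acc.items.map (fun it =>
    (it.1, PySem.List.sorted (PySem.Set.ofList (pvSplitBar (PySem.Str.join "|" it.2))) (fun x => x) false))

-- ===== PORT B =====
-- pass 1 body: `if e and e not in keys: keys.append(e)`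
def pvKeyStep (ks : List String) (row : String × String × Int × String × String) : List String :=
  if row.1 ≠ "" ∧ row.1 ∉ ks then ks ++ [row.1] else ks

-- pass 2: the set comprehension `{t for (e,_,_,chis,_) in eQL if e == k for t in chis.split('|')}`
def pvTokens (eQL : List (String × String × Int × String × String)) (k : String) : List String :=
  (eQL.filter (fun r => r.1 == k)).flatMap (fun r => pvSplitBar r.2.2.2.1)

def eD_4_eQL_alt (eQL : List (String × String × Int × String × String)) : List (String × List String) :=
  let keys := eQL.foldl pvKeyStep []
  keys.map (fun k => (k, PySem.List.sorted (PySem.Set.ofList (pvTokens eQL k)) (fun x => x) false))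

-- ===== PRECONDITION & SPEC =====
def Spec_eD_4_eQL (eQL : List (String × String × Int × String × String)) (out : List (String × List String)) : Prop := out = eD_4_eQL_alt eQL
instance (eQL : List (String × String × Int × String × String)) (out : List (String × List String)) : Decidable (Spec_eD_4_eQL eQL out) := by unfold Spec_eD_4_eQL; infer_instance

-- ===== CLAIM (what is proved, stated in full; the proofs are below) =====
def Claim_equal_eD_4_eQL : Prop := ∀ (eQL : List (String × String × Int × String × String)), Dom_eD_4_eQL eQL → Spec_eD_4_eQL eQL (eD_4_eQL eQL)

-- ===== LEMMAS AND PROOFS =====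

-- reference splitter on '|' at the character level
def pvMySplit : List Char → List (List Char)
  | [] => [[]]
  | c :: rest => if c = '|' then [] :: pvMySplit rest else (pvMySplit rest).modifyHead (c :: ·)

theorem pvMySplit_ne_nil (l : List Char) : pvMySplit l ≠ [] := by
  cases l with
  | nil => simp [pvMySplit]
  | cons c rest =>
    simp only [pvMySplit]
    split_ifs
    · simp
    · cases h : pvMySplit rest with
      | nil => exact absurd h (pvMySplit_ne_nil rest)
      | cons a t => simp [List.modifyHead]

theorem pvGo_spec (fuel : Nat) (l cur : List Char) (acc : List (List Char))
    (h : l.length < fuel) :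
    PySem.Chars.splitOn.go ['|'] fuel l cur acc
      = acc.reverse ++ (pvMySplit l).modifyHead (cur.reverse ++ ·) := by
  induction fuel generalizing l cur acc with
  | zero => omega
  | succ fuel ih =>
    cases l with
    | nil =>
      simp [PySem.Chars.splitOn.go, pvMySplit]
    | cons c rest =>
      by_cases hc : c = '|'
      · subst hc
        have hpref : List.isPrefixOf ['|'] ('|' :: rest) = true := by
          simp [List.isPrefixOf]
        rw [PySem.Chars.splitOn.go]
        simp only [hpref, if_pos]
        rw [show List.drop (['|'] : List Char).length ('|' :: rest) = rest from rfl]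
        rw [ih rest [] (cur.reverse :: acc) (by simpa using Nat.lt_of_succ_lt_succ h)]
        simp [pvMySplit]
        cases pvMySplit rest <;> simp
      · have hpref : List.isPrefixOf ['|'] (c :: rest) = false := by
          simp [List.isPrefixOf, Ne.symm hc]
        rw [PySem.Chars.splitOn.go]
        simp only [hpref, Bool.false_eq_true, if_neg, not_false_iff]
        rw [ih rest (c :: cur) acc (by simpa using Nat.lt_of_succ_lt_succ h)]
        simp only [pvMySplit, if_neg hc, List.modifyHead_modifyHead, List.reverse_cons,
          List.append_assoc, List.singleton_append]
        congr 1

theorem pvSplitOn_eq_mySplit (s : List Char) :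
    PySem.Chars.splitOn s ['|'] = pvMySplit s := by
  unfold PySem.Chars.splitOn
  rw [pvGo_spec s.length.succ s [] [] (Nat.lt_succ_self _)]
  cases h : pvMySplit s with
  | nil => exact absurd h (pvMySplit_ne_nil s)
  | cons a t => simp [List.modifyHead]

theorem pvModifyHead_append {α : Type} (f : α → α) (a b : List α) (h : a ≠ []) :
    (a ++ b).modifyHead f = a.modifyHead f ++ b := by
  cases a with
  | nil => exact absurd rfl h
  | cons x xs => simp [List.modifyHead]

theorem pvMySplit_append (a b : List Char) :
    pvMySplit (a ++ '|' :: b) = pvMySplit a ++ pvMySplit b := by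
  induction a with
  | nil => simp [pvMySplit]
  | cons c a' ih =>
    by_cases hc : c = '|'
    · subst hc
      simp [pvMySplit, ih]
    · simp only [List.cons_append, pvMySplit, if_neg hc, ih]
      rw [pvModifyHead_append _ _ _ (pvMySplit_ne_nil a')]

-- string-level splitter bridged to the character level
theorem pvSplitBar_toList (s : String) :
    (pvSplitBar s).map String.toList = pvMySplit s.toList := by
  have h := PySem.Str.split?_map s "|"
  have hsep : ("|" : String).toList = ['|'] := rfl
  rw [hsep] at h
  cases e : PySem.Str.split? s "|" with
  | none => rw [e] at h; simp [PySem.Chars.split?] at h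
  | some l =>
    rw [e] at h
    simp only [PySem.Chars.split?, List.isEmpty_cons, Option.map_some] at h
    simp only [pvSplitBar, e, Option.getD_some]
    rw [Option.some_inj.mp h, pvSplitOn_eq_mySplit]

-- character-level: splitting the '|'-join of a nonempty list is the concatenation of the splits
theorem pvMySplit_join (cs : List (List Char)) (hne : cs ≠ []) :
    pvMySplit (PySem.Chars.join ['|'] cs) = cs.flatMap pvMySplit := by
  induction cs with
  | nil => exact absurd rfl hne
  | cons p rest ih =>
    cases rest with
    | nil => simp [PySem.Chars.join_singleton]
    | cons q rest' =>
      rw [PySem.Chars.join_cons_cons]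
      have : p ++ ['|'] ++ PySem.Chars.join ['|'] (q :: rest') = p ++ '|' :: PySem.Chars.join ['|'] (q :: rest') := by simp
      rw [this, pvMySplit_append, ih (by simp)]
      simp

-- '|'.join(vals).split('|') = concatenation of the per-element splits (vals nonempty)
theorem pvJoinSplit (vals : List String) (hne : vals ≠ []) :
    pvSplitBar (PySem.Str.join "|" vals) = vals.flatMap pvSplitBar := by
  have hinj : Function.Injective (List.map String.toList) :=
    List.map_injective_iff.mpr (fun a b hab => String.toList_injective hab)
  apply hinj
  rw [pvSplitBar_toList, PySem.Str.toList_join]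
  have hsep : ("|" : String).toList = ['|'] := rfl
  rw [hsep, pvMySplit_join _ (by simpa using hne)]
  rw [List.map_flatMap, List.flatMap_map]
  exact List.flatMap_congr (fun v _ => (pvSplitBar_toList v).symm)

-- A's per-key value list: the chis fields of the rows with this key
def pvValsOf (l : List (String × String × Int × String × String)) (k : String) : List String :=
  (l.filter (fun r => r.1 == k)).map (fun r => r.2.2.2.1)

theorem pvValsOf_append_singleton (l : List (String × String × Int × String × String))
    (x : String × String × Int × String × String) (k : String) :
    pvValsOf (l ++ [x]) k = pvValsOf l k ++ (if x.1 == k then [x.2.2.2.1] else []) := by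
  simp only [pvValsOf, List.filter_append, List.map_append]
  congr 1
  by_cases h : x.1 == k <;> simp [List.filter, h]

-- characterisation of A's accumulator dict in terms of B's key list and pvValsOf
theorem pvAccChar (l : List (String × String × Int × String × String)) :
    (l.foldl pvKeyStep []).Nodup
    ∧ (∀ k ∈ l.foldl pvKeyStep [], k ≠ "" ∧ ∃ r ∈ l, r.1 = k)
    ∧ (∀ r ∈ l, r.1 ≠ "" → r.1 ∈ l.foldl pvKeyStep [])
    ∧ (l.foldl pvStepA PySem.Dict.empty).items
        = (l.foldl pvKeyStep []).map (fun k => (k, pvValsOf l k)) := by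
  induction l using List.reverseRecOn with
  | nil => simp [PySem.Dict.empty]
  | append_singleton l x ih =>
    obtain ⟨hnd, hb, hc, ha⟩ := ih
    rw [List.foldl_append, List.foldl_append]
    simp only [List.foldl_cons, List.foldl_nil]
    have hkeys : (l.foldl pvStepA PySem.Dict.empty).keys = l.foldl pvKeyStep [] := by
      have h0 : (l.foldl pvStepA PySem.Dict.empty).keys
          = (l.foldl pvStepA PySem.Dict.empty).items.map (fun p => p.1) := rfl
      rw [h0, ha, List.map_map]
      have hid : ∀ K : List String,
          K.map ((fun (p : String × List String) => p.1) ∘ fun k => (k, pvValsOf l k)) = K := by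
        intro K
        induction K with
        | nil => rfl
        | cons a t iht => simp only [List.map_cons, iht, Function.comp_apply]
      exact hid _
    by_cases he : x.1 = ""
    · have hks : pvKeyStep (l.foldl pvKeyStep []) x = l.foldl pvKeyStep [] := by
        simp [pvKeyStep, he]
      have hst : pvStepA (l.foldl pvStepA PySem.Dict.empty) x = l.foldl pvStepA PySem.Dict.empty := by
        simp [pvStepA, he]
      rw [hks, hst]
      refine ⟨hnd, ?_, ?_, ?_⟩
      · intro k hk
        obtain ⟨hk1, r, hr, hr2⟩ := hb k hk
        exact ⟨hk1, r, List.mem_append_left _ hr, hr2⟩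
      · intro r hr hre
        rcases List.mem_append.mp hr with h1 | h1
        · exact hc r h1 hre
        · simp at h1; subst h1; exact absurd he hre
      · rw [ha]
        apply List.map_congr_left
        intro k hk
        have hkne : k ≠ "" := (hb k hk).1
        have hxk : (x.1 == k) = false :=
          beq_eq_false_iff_ne.mpr (by rw [he]; exact fun h => hkne h.symm)
        rw [pvValsOf_append_singleton, hxk]
        simp
    · by_cases hm : x.1 ∈ l.foldl pvKeyStep []
      · have hks : pvKeyStep (l.foldl pvKeyStep []) x = l.foldl pvKeyStep [] := by
          simp [pvKeyStep, hm]
        have hcont : (l.foldl pvStepA PySem.Dict.empty).contains x.1 = true := by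
          rw [PySem.Dict.contains_eq_decide_mem_keys, hkeys]
          simpa using hm
        have hget : (l.foldl pvStepA PySem.Dict.empty).getD x.1 [] = pvValsOf l x.1 := by
          apply PySem.Dict.getD_of_mem_items
          · rw [ha]
            exact List.mem_map.mpr ⟨x.1, hm, rfl⟩
          · rw [hkeys]; exact hnd
        have hst : pvStepA (l.foldl pvStepA PySem.Dict.empty) x
            = (l.foldl pvStepA PySem.Dict.empty).insert x.1 (pvValsOf l x.1 ++ [x.2.2.2.1]) := by
          simp [pvStepA, he, hcont, hget]
        rw [hks, hst]
        refine ⟨hnd, ?_, ?_, ?_⟩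
        · intro k hk
          obtain ⟨hk1, r, hr, hr2⟩ := hb k hk
          exact ⟨hk1, r, List.mem_append_left _ hr, hr2⟩
        · intro r hr hre
          rcases List.mem_append.mp hr with h1 | h1
          · exact hc r h1 hre
          · simp at h1; subst h1; exact hm
        · rw [PySem.Dict.items_insert_of_contains _ _ hcont, ha, List.map_map]
          apply List.map_congr_left
          intro k hk
          simp only [Function.comp_apply]
          rw [pvValsOf_append_singleton]
          by_cases hkx : k = x.1
          · subst hkx
            simp
          · have h1 : (k == x.1) = false := by simpa using hkx
            have h2 : (x.1 == k) = false :=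
              beq_eq_false_iff_ne.mpr (fun h => hkx h.symm)
            simp [h1, h2]
      · have hks : pvKeyStep (l.foldl pvKeyStep []) x = l.foldl pvKeyStep [] ++ [x.1] := by
          simp [pvKeyStep, he, hm]
        have hcont : (l.foldl pvStepA PySem.Dict.empty).contains x.1 = false := by
          rw [PySem.Dict.contains_eq_decide_mem_keys, hkeys]
          simpa using hm
        have hvnil : pvValsOf l x.1 = [] := by
          unfold pvValsOf
          rw [List.filter_eq_nil_iff.mpr, List.map_nil]
          intro r hr
          simp only [beq_iff_eq]
          intro hr1
          exact hm (hr1 ▸ hc r hr (hr1.symm ▸ he))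
        have hst : pvStepA (l.foldl pvStepA PySem.Dict.empty) x
            = (l.foldl pvStepA PySem.Dict.empty).insert x.1 [x.2.2.2.1] := by
          simp only [pvStepA, he, hcont, Bool.false_eq_true, ite_false]
          rw [PySem.Dict.getD_insert_self, PySem.Dict.insert_insert_self]
          simp
        rw [hks, hst]
        refine ⟨?_, ?_, ?_, ?_⟩
        · rw [List.nodup_append]
          refine ⟨hnd, by simp, ?_⟩
          have h3 : ∀ a ∈ List.foldl pvKeyStep [] l, ¬ a = x.1 :=
            fun a ha' h => hm (h ▸ ha')
          simpa using h3
        · intro k hk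
          rcases List.mem_append.mp hk with h1 | h1
          · obtain ⟨hk1, r, hr, hr2⟩ := hb k h1
            exact ⟨hk1, r, List.mem_append_left _ hr, hr2⟩
          · simp at h1; subst h1
            exact ⟨he, x, List.mem_append_right _ (by simp), rfl⟩
        · intro r hr hre
          rcases List.mem_append.mp hr with h1 | h1
          · exact List.mem_append_left _ (hc r h1 hre)
          · simp at h1; subst h1; exact List.mem_append_right _ (by simp)
        · rw [PySem.Dict.items_insert_of_not_contains _ _ hcont, ha, List.map_append]
          congr 1
          · apply List.map_congr_left
            intro k hk
            rw [pvValsOf_append_singleton]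
            have : (x.1 == k) = false := by
              simp; exact fun h => hm (h ▸ hk)
            simp [this]
          · simp only [List.map_cons, List.map_nil]
            rw [pvValsOf_append_singleton, hvnil]
            simp

theorem pvMain (eQL : List (String × String × Int × String × String)) :
    eD_4_eQL eQL = eD_4_eQL_alt eQL := by
  obtain ⟨hnd, hb, hc, ha⟩ := pvAccChar eQL
  show (List.foldl pvStepA PySem.Dict.empty eQL).items.map (fun it =>
      (it.1, PySem.List.sorted (PySem.Set.ofList (pvSplitBar (PySem.Str.join "|" it.2))) (fun x => x) false))
    = (eQL.foldl pvKeyStep []).map (fun k =>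
        (k, PySem.List.sorted (PySem.Set.ofList (pvTokens eQL k)) (fun x => x) false))
  rw [ha, List.map_map]
  apply List.map_congr_left
  intro k hk
  simp only [Function.comp_apply]
  have hvne : pvValsOf eQL k ≠ [] := by
    obtain ⟨_, r, hr, hr2⟩ := hb k hk
    unfold pvValsOf
    simp only [ne_eq, List.map_eq_nil_iff, List.filter_eq_nil_iff, not_forall]
    exact ⟨r, hr, by simp [hr2]⟩
  rw [pvJoinSplit _ hvne]
  unfold pvValsOf pvTokens
  rw [List.flatMap_map]

-- ===== VERDICT (by name: the statement is the Claim_ definition above) =====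
theorem eD_4_eQL_spec : Claim_equal_eD_4_eQL := by
  intro eQL _
  unfold Spec_eD_4_eQL
  exact pvMain eQL
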